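-- pv_equiv track=rewrite | github.com/ivi982010/SySdL-TPs | Lexer.py | a_Product
-- ===== SOURCE A (Python) =====
-- def a_Product (tokens, acu):
--     s = 0
--     for c in acu:
--         if c == '*':
--             s = 1
--         else:
--             s = -1
--     if s == 1:
--         tokens.append(("<OpMat>", acu))
--     return (s == 1)
-- ===== SOURCE B (Python) =====
-- def a_Product(tokens, acu):
--     matched = len(acu) > 0 and acu[-1] == '*'
--     if matched:
--         tokens.append(("<OpMat>", acu))
--     return matched
-- ===== Notes on version B (the rewrite author's own statement) =====
-- stated objective: faster
-- what changed: Replaced the character-by-character loop (whose state only reflects the last character) with a direct O(1) check of acu's last character.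
import Mathlib
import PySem

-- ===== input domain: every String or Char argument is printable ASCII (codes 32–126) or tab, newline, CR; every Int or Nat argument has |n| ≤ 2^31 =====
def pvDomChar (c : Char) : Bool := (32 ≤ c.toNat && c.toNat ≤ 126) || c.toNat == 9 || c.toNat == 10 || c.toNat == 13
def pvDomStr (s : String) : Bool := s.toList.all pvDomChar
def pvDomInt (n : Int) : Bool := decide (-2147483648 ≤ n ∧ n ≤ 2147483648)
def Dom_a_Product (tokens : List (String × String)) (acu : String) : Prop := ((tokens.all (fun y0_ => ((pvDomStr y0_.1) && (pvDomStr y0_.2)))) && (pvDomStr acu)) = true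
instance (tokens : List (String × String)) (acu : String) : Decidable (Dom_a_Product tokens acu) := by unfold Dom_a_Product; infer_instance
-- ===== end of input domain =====

-- B replaces the per-character loop (whose state only reflects the last character)
-- by a direct check of acu's last character; equivalence is about the RETURN value —
-- both Pythons also append ("<OpMat>", acu) to tokens exactly when they return True.

-- ===== PORT A =====
def a_Product (tokens : List (String × String)) (acu : String) : Bool :=
  let s : Int := acu.toList.foldl (fun s c => if c = '*' then 1 else -1) 0
  -- the append to tokens happens iff s == 1; the return value is (s == 1)
  s == 1

-- ===== PORT B =====
def a_Product_alt (tokens : List (String × String)) (acu : String) : Bool :=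
  decide (0 < PySem.Str.len acu) && (PySem.Str.pyGet? acu (-1) == some '*')

-- ===== PRECONDITION & SPEC =====
def Spec_a_Product (tokens : List (String × String)) (acu : String) (out : Bool) : Prop := out = a_Product_alt tokens acu
instance (tokens : List (String × String)) (acu : String) (out : Bool) : Decidable (Spec_a_Product tokens acu out) := by unfold Spec_a_Product; infer_instance

-- ===== CLAIM (what is proved, stated in full; the proofs are below) =====
def Claim_equal_a_Product : Prop := ∀ (tokens : List (String × String)) (acu : String), Dom_a_Product tokens acu → Spec_a_Product tokens acu (a_Product tokens acu)

-- ===== LEMMAS AND PROOFS =====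
theorem aProduct_foldl_last (l : List Char) (s : Int) (h : l ≠ []) :
    l.foldl (fun s c => if c = '*' then 1 else -1) s
      = (if l.getLast? = some '*' then (1 : Int) else -1) := by
  induction l generalizing s with
  | nil => exact absurd rfl h
  | cons a t ih =>
    cases t with
    | nil => simp [List.foldl]
    | cons b u =>
      simp only [List.foldl]
      have := ih (if b = '*' then (1:Int) else -1) (by simp)
      simpa [List.foldl, List.getLast?_cons_cons] using this
-- ===== VERDICT (by name: the statement is the Claim_ definition above) =====
theorem a_Product_spec : Claim_equal_a_Product := by
  intro tokens acu _
  unfold Spec_a_Product a_Product a_Product_alt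
  simp only [PySem.Str.pyGet?, PySem.Chars.pyGet?, PySem.List.pyGet?_neg_one]
  rcases h : acu.toList with _ | ⟨c, t⟩
  · simp [PySem.Str.len, PySem.Chars.len, h]
  · rw [aProduct_foldl_last (c :: t) 0 (by simp)]
    simp only [PySem.Str.len, PySem.Chars.len, h]
    split_ifs with hc
    · simp [hc]
    · simp [hc]
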